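-- pv_equiv track=rewrite | github.com/facebookresearch/TaBERT | preprocess/htmltable.py | remove_columns_by_id
-- ===== SOURCE A (Python) =====
-- def remove_columns_by_id(rows, col_id_to_remove):
--     if not col_id_to_remove:
--         return rows
--
--     new_rows = [[] for _ in rows]
--     header = rows[0]
--     for col_id in range(len(header)):
--         if col_id not in col_id_to_remove:
--             [row.append(old_row[col_id]) for row, old_row in zip(new_rows, rows)]
--
--     return new_rows
-- ===== SOURCE B (Python) =====
-- def remove_columns_by_id(rows, col_id_to_remove):
--     if not col_id_to_remove:
--         return rows
--     width = len(rows[0])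
--     removed = set(col_id_to_remove)
--     return [[x for c, x in enumerate(row[:width]) if c not in removed] for row in rows]
-- ===== Notes on version B (the rewrite author's own statement) =====
-- stated objective: alternative
-- what changed: Replaces A's column-major loop that appends one cell to every new row per kept column with a single row-major pass: each row is truncated to the header width, enumerated, and filtered against a set of removed column ids - no per-column indexing at all.
import Mathlib
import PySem

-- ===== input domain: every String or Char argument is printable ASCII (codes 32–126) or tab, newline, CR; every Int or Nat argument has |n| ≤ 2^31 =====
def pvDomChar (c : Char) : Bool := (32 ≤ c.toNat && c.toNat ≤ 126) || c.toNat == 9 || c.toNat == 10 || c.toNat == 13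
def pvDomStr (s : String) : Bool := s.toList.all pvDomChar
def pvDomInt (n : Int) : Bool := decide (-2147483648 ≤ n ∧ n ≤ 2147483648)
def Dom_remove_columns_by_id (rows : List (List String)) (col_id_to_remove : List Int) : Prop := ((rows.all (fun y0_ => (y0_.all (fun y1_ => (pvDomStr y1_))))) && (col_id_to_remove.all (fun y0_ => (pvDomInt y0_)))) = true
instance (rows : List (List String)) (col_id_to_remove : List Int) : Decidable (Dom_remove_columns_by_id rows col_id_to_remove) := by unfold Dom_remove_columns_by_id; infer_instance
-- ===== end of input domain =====

-- B replaces A's column-major append-to-every-row loop with a single row-major pass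
-- that truncates each row to the header width, enumerates it and filters out the
-- removed column ids (alternative decomposition; no per-column indexing).

-- ===== PORT A =====
-- A: builds empty new rows, then for each kept column id of range(len(header))
-- appends that column's cell to every new row (column-major). old_row[col_id] is
-- total here via pyGet?.getD; Pre_ excludes exactly the inputs where Python raises.
def remove_columns_by_id (rows : List (List String)) (col_id_to_remove : List Int) : List (List String) :=
  if col_id_to_remove = [] then rows
  else
    let header := rows.headD []
    (PySem.List.pyRange 0 (header.length : Int) 1).foldl
      (fun new_rows col_id =>
        if col_id ∉ col_id_to_remove then
          (new_rows.zip rows).map (fun p => p.1 ++ [(PySem.List.pyGet? p.2 col_id).getD ""])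
        else new_rows)
      (rows.map (fun _ => []))

-- ===== PORT B =====
-- B: for each row, slice row[:width], enumerate it, drop the removed ids, keep the cells.
def remove_columns_by_id_alt (rows : List (List String)) (col_id_to_remove : List Int) : List (List String) :=
  if col_id_to_remove = [] then rows
  else
    let width := (rows.headD []).length
    let removed := PySem.Set.ofList col_id_to_remove
    rows.map (fun row =>
      ((PySem.List.enumerate (PySem.List.slice row none (some (width : Int))) 0).filter
        (fun p => decide (p.1 ∉ removed))).map (·.2))

-- ===== PRECONDITION & SPEC =====
-- Pre_ excludes exactly the inputs where Python A raises IndexError: a nonempty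
-- col_id_to_remove with either no rows (rows[0]) or some row shorter than a kept
-- column index of the header (old_row[col_id]).
def Pre_remove_columns_by_id (rows : List (List String)) (col_id_to_remove : List Int) : Prop :=
  col_id_to_remove = [] ∨
    (rows ≠ [] ∧ ∀ row ∈ rows, ∀ c ∈ List.range (rows.headD []).length,
      (c : Int) ∉ col_id_to_remove → c < row.length)
instance (rows : List (List String)) (col_id_to_remove : List Int) : Decidable (Pre_remove_columns_by_id rows col_id_to_remove) := by unfold Pre_remove_columns_by_id; infer_instance

def pvWitness_remove_columns_by_id : List (List String) × List Int :=
  ([["a", "b", "c"], ["d", "e", "f"]], [1])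

def Spec_remove_columns_by_id (rows : List (List String)) (col_id_to_remove : List Int) (out : List (List String)) : Prop := out = remove_columns_by_id_alt rows col_id_to_remove
instance (rows : List (List String)) (col_id_to_remove : List Int) (out : List (List String)) : Decidable (Spec_remove_columns_by_id rows col_id_to_remove out) := by unfold Spec_remove_columns_by_id; infer_instance

-- ===== CLAIM (what is proved, stated in full; the proofs are below) =====
def Claim_equal_remove_columns_by_id : Prop := ∀ (rows : List (List String)) (col_id_to_remove : List Int), Dom_remove_columns_by_id rows col_id_to_remove → Pre_remove_columns_by_id rows col_id_to_remove → Spec_remove_columns_by_id rows col_id_to_remove (remove_columns_by_id rows col_id_to_remove)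
-- ===== LEMMAS AND PROOFS =====

-- A's column-major foldl, started from rows.map h, equals a row-major map that
-- appends the kept cells of cs to h's value on each row.
theorem loop_eq (rows : List (List String)) (rem : List Int) (cs : List Int)
    (h : List String → List String) :
    cs.foldl
      (fun new_rows col_id =>
        if col_id ∉ rem then
          (new_rows.zip rows).map (fun p => p.1 ++ [(PySem.List.pyGet? p.2 col_id).getD ""])
        else new_rows)
      (rows.map h)
    = rows.map (fun old => h old ++
        (cs.filter (fun c => c ∉ rem)).map (fun c => (PySem.List.pyGet? old c).getD "")) := by
  induction cs generalizing h with
  | nil => simp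
  | cons c cs ih =>
    by_cases hc : c ∈ rem
    · simp only [List.foldl_cons, List.filter_cons, hc, not_true_eq_false, decide_false]
      simpa using ih h
    · simp only [List.foldl_cons, List.filter_cons, hc, not_false_eq_true, if_pos, decide_true]
      rw [← List.map_prod_right_eq_zip, List.map_map]
      have := ih (fun old => h old ++ [(PySem.List.pyGet? old c).getD ""])
      simp only [Function.comp_def] at this ⊢
      rw [this]
      simp [List.append_assoc]

-- On a row all of whose kept header indices are in range, A's kept-column gather
-- equals B's enumerate-truncate-filter pass.
theorem row_eq (rem : List Int) (w : Nat) (row : List String)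
    (hr : ∀ c ∈ List.range w, (c : Int) ∉ rem → c < row.length) :
    ((PySem.List.pyRange 0 (w : Int) 1).filter (fun c => c ∉ rem)).map
        (fun c => (PySem.List.pyGet? row c).getD "")
    = ((PySem.List.enumerate (PySem.List.slice row none (some (w : Int))) 0).filter
        (fun p => decide (p.1 ∉ PySem.Set.ofList rem))).map (·.2) := by
  rw [PySem.List.slice_to_natCast,
      PySem.List.enumerate_eq_map_pyRange (d := ""), List.filter_map, List.map_map]
  simp only [PySem.List.len_eq, List.length_take, Function.comp_def,
    PySem.Set.mem_ofList]
  set m : Nat := min w row.length with hm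
  have hmw : (m : Int) ≤ (w : Int) := by exact_mod_cast Nat.min_le_left w row.length
  rw [PySem.List.pyRange_one_append 0 (m : Int) (w : Int) (by positivity) hmw]
  have htail : (PySem.List.pyRange (m : Int) (w : Int) 1).filter (fun c => c ∉ rem) = [] := by
    rw [List.filter_eq_nil_iff]
    intro c hc
    rw [PySem.List.mem_pyRange_one] at hc
    simp only [decide_not, Bool.not_eq_true', decide_eq_false_iff_not, not_not]
    by_contra hcr
    obtain ⟨k, hk⟩ : ∃ k : Nat, c = (k : Int) := ⟨c.toNat, by omega⟩
    subst hk
    have hkw : k < w := by exact_mod_cast hc.2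
    have hkr := hr k (List.mem_range.mpr hkw) hcr
    have hkm : k < m := Nat.lt_min.mpr ⟨hkw, hkr⟩
    exact absurd hc.1 (by omega)
  rw [List.filter_append, htail, List.append_nil]
  apply List.map_congr_left
  intro c hc
  have hcm := (PySem.List.mem_pyRange_one).mp (List.mem_filter.mp hc).1
  have h1 : c < (row.length : Int) := by simp only [hm] at hcm; push_cast at hcm ⊢; omega
  have h2 : c < (w : Int) := by simp only [hm] at hcm; push_cast at hcm ⊢; omega
  simp [PySem.List.pyGet?, PySem.List.pyGetD, PySem.List.pyIdx?, hcm.1, h1, h2]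

-- ===== VERDICT (by name: the statement is the Claim_ definition above) =====
theorem remove_columns_by_id_spec : Claim_equal_remove_columns_by_id := by
  intro rows rem _ hpre
  unfold Spec_remove_columns_by_id remove_columns_by_id remove_columns_by_id_alt
  by_cases hrem : rem = []
  · simp [hrem]
  · simp only [hrem, reduceIte]
    rw [loop_eq rows rem _ (fun _ => [])]
    apply List.map_congr_left
    intro row hrow
    rcases hpre with h | ⟨_, hpre⟩
    · exact absurd h hrem
    · simpa using row_eq rem (rows.headD []).length row (hpre row hrow)
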